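-- pv_equiv track=rewrite | github.com/joooonis/programmers | KAKAOBrains/test.py | find_matching_substring
-- ===== SOURCE A (Python) =====
-- def find_matching_substring(text, prefixString, suffixString):
--     prefixScore = ''
--     suffixScore = ''
--     textScore = 0
--
--     # Find prefixScore
--     for i in range(len(prefixString), 0, -1):
--         if text.endswith(prefixString[:i]):
--             prefixScore = prefixString[:i]
--             break
--
--     # Find suffixScore
--     for i in range(len(suffixString)):
--         if text.startswith(suffixString[i:]):
--             suffixScore = suffixString[i:]
--             break
--
--     # Compute textScore
--     textScore = len(prefixScore) + len(suffixScore)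
--
--     # Find the matching substring with the highest textScore
--     matching_substrings = []
--     for i in range(len(text)):
--         for j in range(i, len(text)):
--             substring = text[i:j+1]
--             if substring.startswith(prefixScore) and substring.endswith(suffixScore):
--                 matching_substrings.append(substring)
--
--     highest_score = 0
--     best_substring = ''
--     for substring in matching_substrings:
--         score = len(substring)
--         if score > highest_score:
--             highest_score = score
--             best_substring = substring
--         elif score == highest_score and substring < best_substring:
--             best_substring = substring
--
--     return best_substring
-- ===== SOURCE B (Python) =====
-- def find_matching_substring(text, prefixString, suffixString):
--     # Closed-form: the unique longest candidate runs from the first occurrence of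
--     # prefixScore to the end of the last occurrence of suffixScore.
--     prefixScore = next((prefixString[:i] for i in range(len(prefixString), 0, -1)
--                         if text.endswith(prefixString[:i])), '')
--     suffixScore = next((suffixString[i:] for i in range(len(suffixString))
--                         if text.startswith(suffixString[i:])), '')
--     start = text.find(prefixScore)
--     stop = text.rfind(suffixScore) + len(suffixScore)
--     if stop - start >= max(len(prefixScore), len(suffixScore), 1):
--         return text[start:stop]
--     return ''
-- ===== Notes on version B (the rewrite author's own statement) =====
-- stated objective: faster
-- what changed: B replaces A's enumeration of all O(n^2) substrings plus a max/tie-break scan by a closed form: the winning substring provably runs from the first occurrence of prefixScore to the end of the last occurrence of suffixScore (the max-length candidate is unique, so the lexicographic tie-break is dead code), computed with find/rfind.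
import Mathlib
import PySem

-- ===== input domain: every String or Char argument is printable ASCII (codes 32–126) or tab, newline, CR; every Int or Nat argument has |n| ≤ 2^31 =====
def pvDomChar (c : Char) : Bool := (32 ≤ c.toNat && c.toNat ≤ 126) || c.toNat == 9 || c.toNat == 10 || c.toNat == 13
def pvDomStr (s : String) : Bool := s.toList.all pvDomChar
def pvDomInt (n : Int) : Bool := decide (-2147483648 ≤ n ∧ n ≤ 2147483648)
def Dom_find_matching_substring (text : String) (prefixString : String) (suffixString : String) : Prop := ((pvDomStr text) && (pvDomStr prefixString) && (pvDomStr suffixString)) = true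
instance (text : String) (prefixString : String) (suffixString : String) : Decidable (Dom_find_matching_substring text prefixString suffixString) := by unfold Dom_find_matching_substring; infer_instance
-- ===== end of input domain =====

-- B replaces A's O(n^3)-substring enumeration by a closed form: the unique longest
-- candidate runs from the first occurrence of prefixScore to the end of the last
-- occurrence of suffixScore; a timing run decides whether "faster" may be claimed.

-- ===== PORT A =====
-- for i in range(len(prefixString), 0, -1): if text.endswith(prefixString[:i]): prefixScore = ...; break
def pvAPrefScan (t p : List Char) : List Int → List Char
  | [] => []
  | i :: rest =>
      if PySem.Chars.endswith t (PySem.List.slice p none (some i)) then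
        PySem.List.slice p none (some i)
      else pvAPrefScan t p rest

-- for i in range(len(suffixString)): if text.startswith(suffixString[i:]): suffixScore = ...; break
def pvASufScan (t s : List Char) : List Int → List Char
  | [] => []
  | i :: rest =>
      if PySem.Chars.startswith t (PySem.List.slice s (some i) none) then
        PySem.List.slice s (some i) none
      else pvASufScan t s rest

-- the selection loop: score > highest, or score == highest and substring < best
def pvAStep (acc : Int × List Char) (sub : List Char) : Int × List Char :=
  if ((sub.length : Int) > acc.1) then ((sub.length : Int), sub)
  else if ((sub.length : Int) = acc.1 ∧ sub < acc.2) then (acc.1, sub)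
  else acc

def find_matching_substring (text : String) (prefixString : String) (suffixString : String) : String :=
  let t := text.toList
  let prefixScore := pvAPrefScan t prefixString.toList (PySem.List.pyRange (prefixString.toList.length : Int) 0 (-1))
  let suffixScore := pvASufScan t suffixString.toList (PySem.List.pyRange 0 (suffixString.toList.length : Int))
  let _textScore : Int := (prefixScore.length : Int) + (suffixScore.length : Int)
  let matching_substrings := (PySem.List.pyRange 0 (t.length : Int)).foldl (fun acc i =>
      (PySem.List.pyRange i (t.length : Int)).foldl (fun acc2 j =>
        if PySem.Chars.startswith (PySem.List.slice t (some i) (some (j + 1))) prefixScore &&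
           PySem.Chars.endswith (PySem.List.slice t (some i) (some (j + 1))) suffixScore then
          acc2 ++ [PySem.List.slice t (some i) (some (j + 1))]
        else acc2) acc) ([] : List (List Char))
  let best := matching_substrings.foldl pvAStep ((0 : Int), ([] : List Char))
  String.ofList best.2

-- ===== PORT B =====
-- prefixScore = next((prefixString[:i] for i in range(len(prefixString),0,-1) if text.endswith(...)), '')
def pvBPrefScan (t p : List Char) : List Int → List Char
  | [] => []
  | i :: rest =>
      if PySem.Chars.endswith t (PySem.List.slice p none (some i)) then
        PySem.List.slice p none (some i)
      else pvBPrefScan t p rest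

def pvBSufScan (t s : List Char) : List Int → List Char
  | [] => []
  | i :: rest =>
      if PySem.Chars.startswith t (PySem.List.slice s (some i) none) then
        PySem.List.slice s (some i) none
      else pvBSufScan t s rest

def find_matching_substring_alt (text : String) (prefixString : String) (suffixString : String) : String :=
  let t := text.toList
  let prefixScore := pvBPrefScan t prefixString.toList (PySem.List.pyRange (prefixString.toList.length : Int) 0 (-1))
  let suffixScore := pvBSufScan t suffixString.toList (PySem.List.pyRange 0 (suffixString.toList.length : Int))
  let start := PySem.Chars.find t prefixScore
  let stop := PySem.Chars.rfind t suffixScore + (suffixScore.length : Int)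
  if stop - start ≥ max (max (prefixScore.length : Int) (suffixScore.length : Int)) 1 then
    String.ofList (PySem.List.slice t (some start) (some stop))
  else ""

-- ===== PRECONDITION & SPEC =====
def Spec_find_matching_substring (text : String) (prefixString : String) (suffixString : String) (out : String) : Prop := out = find_matching_substring_alt text prefixString suffixString
instance (text : String) (prefixString : String) (suffixString : String) (out : String) : Decidable (Spec_find_matching_substring text prefixString suffixString out) := by unfold Spec_find_matching_substring; infer_instance

-- ===== CLAIM (what is proved, stated in full; the proofs are below) =====
def Claim_equal_find_matching_substring : Prop := ∀ (text : String) (prefixString : String) (suffixString : String), Dom_find_matching_substring text prefixString suffixString → Spec_find_matching_substring text prefixString suffixString (find_matching_substring text prefixString suffixString)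

-- ===== LEMMAS AND PROOFS =====

-- the two prefix/suffix scans are the same computation
theorem pvScan_pref_eq (t p : List Char) (l : List Int) : pvAPrefScan t p l = pvBPrefScan t p l := by
  induction l with
  | nil => rfl
  | cons i rest ih => simp [pvAPrefScan, pvBPrefScan, ih]

theorem pvScan_suf_eq (t s : List Char) (l : List Int) : pvASufScan t s l = pvBSufScan t s l := by
  induction l with
  | nil => rfl
  | cons i rest ih => simp [pvASufScan, pvBSufScan, ih]

-- the scan result is [] or a suffix (resp. prefix) of t
theorem pvPrefScan_spec (t p : List Char) (l : List Int) :
    pvAPrefScan t p l = [] ∨ pvAPrefScan t p l <:+ t := by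
  induction l with
  | nil => exact Or.inl rfl
  | cons i rest ih =>
      by_cases h : PySem.Chars.endswith t (PySem.List.slice p none (some i)) = true
      · exact Or.inr (by simpa [pvAPrefScan, h] using (PySem.Chars.endswith_iff _ _).mp h)
      · simpa [pvAPrefScan, h] using ih

theorem pvSufScan_spec (t s : List Char) (l : List Int) :
    pvASufScan t s l = [] ∨ pvASufScan t s l <+: t := by
  induction l with
  | nil => exact Or.inl rfl
  | cons i rest ih =>
      by_cases h : PySem.Chars.startswith t (PySem.List.slice s (some i) none) = true
      · exact Or.inr (by simpa [pvASufScan, h] using (PySem.Chars.startswith_iff _ _).mp h)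
      · simpa [pvASufScan, h] using ih

theorem pvRfindGo_spec (t sub : List Char) (k : Nat) :
    (0 ≤ PySem.Chars.rfind.go t sub k ∧ (PySem.Chars.rfind.go t sub k).toNat ≤ k ∧
      sub <+: t.drop (PySem.Chars.rfind.go t sub k).toNat ∧
      ∀ j ≤ k, sub <+: t.drop j → j ≤ (PySem.Chars.rfind.go t sub k).toNat) ∨
    (PySem.Chars.rfind.go t sub k = -1 ∧ ∀ j ≤ k, ¬ sub <+: t.drop j) := by
  induction k with
  | zero =>
      by_cases h : sub.isPrefixOf t = true
      · left
        refine ⟨by simp [PySem.Chars.rfind.go, h]; try omega, by simp [PySem.Chars.rfind.go, h], ?_, ?_⟩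
        · simpa [PySem.Chars.rfind.go, h] using List.isPrefixOf_iff_prefix.mp h
        · intro j hj _; simpa [PySem.Chars.rfind.go, h] using hj
      · right
        refine ⟨by simp [PySem.Chars.rfind.go, h], ?_⟩
        intro j hj
        interval_cases j
        simpa [List.isPrefixOf_iff_prefix] using h
  | succ m ih =>
      by_cases h : sub.isPrefixOf (t.drop (m+1)) = true
      · left
        refine ⟨by simp [PySem.Chars.rfind.go, h]; try omega, by simp [PySem.Chars.rfind.go, h], ?_, ?_⟩
        · simpa [PySem.Chars.rfind.go, h] using List.isPrefixOf_iff_prefix.mp h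
        · intro j hj _; simpa [PySem.Chars.rfind.go, h] using hj
      · have hgo : PySem.Chars.rfind.go t sub (m+1) = PySem.Chars.rfind.go t sub m := by
          simp [PySem.Chars.rfind.go, h]
        rcases ih with ⟨h0, hle, hpre, hmax⟩ | ⟨hneg, hnone⟩
        · left
          refine ⟨hgo ▸ h0, hgo ▸ (hle.trans (Nat.le_succ m)), hgo ▸ hpre, ?_⟩
          intro j hj hp
          rw [hgo]
          rcases Nat.lt_succ_iff_lt_or_eq.mp (Nat.lt_succ_of_le hj) with h' | h'
          · exact hmax j (Nat.lt_succ_iff.mp h') hp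
          · exact absurd (List.isPrefixOf_iff_prefix.mpr (h' ▸ hp)) h
        · right
          refine ⟨hgo ▸ hneg, ?_⟩
          intro j hj
          rcases Nat.lt_or_ge j (m+1) with h' | h'
          · exact hnone j (Nat.lt_succ_iff.mp h')
          · have : j = m+1 := le_antisymm hj h'
            subst this
            exact fun hp => h (List.isPrefixOf_iff_prefix.mpr hp)

theorem pvR_facts (t S : List Char) (hS : S = [] ∨ S <+: t) :
    0 ≤ PySem.Chars.rfind t S ∧
    (PySem.Chars.rfind t S).toNat + S.length ≤ t.length ∧
    S <+: t.drop (PySem.Chars.rfind t S).toNat ∧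
    ∀ j ≤ t.length, S <+: t.drop j → j ≤ (PySem.Chars.rfind t S).toNat := by
  have hw : ∃ j ≤ t.length, S <+: t.drop j := by
    rcases hS with h | h
    · exact ⟨t.length, le_refl _, by simp [h]⟩
    · exact ⟨0, Nat.zero_le _, by simpa using h⟩
  rcases pvRfindGo_spec t S t.length with ⟨h0, hle, hpre, hmax⟩ | ⟨_, hnone⟩
  · refine ⟨h0, ?_, hpre, hmax⟩
    have := hpre.length_le
    simp [List.length_drop] at this
    unfold PySem.Chars.rfind
    omega
  · rcases hw with ⟨j, hj, hp⟩
    exact absurd hp (hnone j hj)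

theorem pvF_facts (t P : List Char) (hP : P = [] ∨ P <:+ t) :
    0 ≤ PySem.Chars.find t P ∧
    P <+: t.drop (PySem.Chars.find t P).toNat ∧
    ∀ i < (PySem.Chars.find t P).toNat, ¬ P <+: t.drop i := by
  have h0 : 0 ≤ PySem.Chars.find t P := by
    rcases hP with h | h
    · simp [h, PySem.Chars.find_nil]
    · exact (PySem.Chars.find_nonneg_iff t P).mpr h.isInfix
  obtain ⟨h1, h2⟩ := PySem.Chars.find_spec h0
  exact ⟨h0, h1, h2⟩

-- suffix windows: if S is a suffix of (t.drop i').take L (of full length L, i'+L ≤ t.length),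
-- then S is a prefix of t.drop (i'+L-S.length)
theorem pvSuffix_window (t S : List Char) (i' L : Nat) (hL : i' + L ≤ t.length)
    (h : S <:+ (t.drop i').take L) :
    S.length ≤ L ∧ S <+: t.drop (i' + L - S.length) := by
  have hlen : ((t.drop i').take L).length = L := by
    simp [List.length_take, List.length_drop]; omega
  have hSL : S.length ≤ L := by
    have := h.length_le; omega
  refine ⟨hSL, ?_⟩
  have heq := List.suffix_iff_eq_drop.mp h
  rw [hlen] at heq
  rw [List.drop_take, List.drop_drop] at heq
  have h1 : L - (L - S.length) = S.length := by omega
  have h2 : i' + (L - S.length) = i' + L - S.length := by omega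
  rw [h1, h2] at heq
  exact List.prefix_iff_eq_take.mpr (by simpa using heq)

-- prefix windows: if P is a prefix of t.drop i' and P.length ≤ L then P <+: (t.drop i').take L
theorem pvSuffix_window' (t S : List Char) (i' L : Nat) (hL : i' + L ≤ t.length)
    (hSL : S.length ≤ L) (h : S <+: t.drop (i' + L - S.length)) :
    S <:+ (t.drop i').take L := by
  have hlen : ((t.drop i').take L).length = L := by
    simp [List.length_take, List.length_drop]; omega
  rw [List.suffix_iff_eq_drop, hlen, List.drop_take, List.drop_drop]
  have h1 : L - (L - S.length) = S.length := by omega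
  have h2 : i' + (L - S.length) = i' + L - S.length := by omega
  rw [h1, h2]
  exact List.prefix_iff_eq_take.mp h

def pvMatching (t P S : List Char) : List (List Char) :=
  (PySem.List.pyRange 0 (t.length : Int)).foldl (fun acc i =>
    (PySem.List.pyRange i (t.length : Int)).foldl (fun acc2 j =>
      if PySem.Chars.startswith (PySem.List.slice t (some i) (some (j + 1))) P &&
         PySem.Chars.endswith (PySem.List.slice t (some i) (some (j + 1))) S then
        acc2 ++ [PySem.List.slice t (some i) (some (j + 1))]
      else acc2) acc) []


theorem pvMem_matching (t P S : List Char) (s : List Char) :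
    s ∈ pvMatching t P S ↔ ∃ i' j' : Nat, i' ≤ j' ∧ j' < t.length ∧
      PySem.Chars.startswith ((t.drop i').take (j' + 1 - i')) P = true ∧
      PySem.Chars.endswith ((t.drop i').take (j' + 1 - i')) S = true ∧
      s = (t.drop i').take (j' + 1 - i') := by
  unfold pvMatching
  simp only [PySem.List.foldl_append_if, PySem.List.foldl_append_eq_flatMap]
  simp only [List.nil_append, List.mem_flatMap, List.mem_map, List.mem_filter,
    PySem.List.mem_pyRange_one, Bool.and_eq_true]
  constructor
  · rintro ⟨i, ⟨hi0, hin⟩, j, ⟨⟨hij, hjn⟩, hst, hen⟩, rfl⟩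
    have hj0 : 0 ≤ j := le_trans hi0 hij
    have hslice : PySem.List.slice t (some i) (some (j + 1)) =
        (t.drop i.toNat).take (j.toNat + 1 - i.toNat) := by
      rw [PySem.List.slice_toNat t hi0 (by omega)]
      congr 1
      omega
    refine ⟨i.toNat, j.toNat, by omega, by omega, ?_, ?_, ?_⟩ <;> rw [← hslice]
    · exact hst
    · exact hen
  · rintro ⟨i', j', hij, hjn, hst, hen, rfl⟩
    have hslice : PySem.List.slice t (some (i' : Int)) (some ((j' : Int) + 1)) =
        (t.drop i').take (j' + 1 - i') := by
      rw [PySem.List.slice_toNat t (by omega) (by omega)]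
      congr 1
    exact ⟨(i' : Int), ⟨by omega, by omega⟩, (j' : Int), ⟨⟨by omega, by omega⟩,
      by rw [hslice]; exact hst, by rw [hslice]; exact hen⟩, hslice⟩

theorem pvFold_keep (m : List Char) (l : List (List Char))
    (hlt : ∀ s ∈ l, s ≠ m → s.length < m.length) :
    l.foldl pvAStep ((m.length : Int), m) = ((m.length : Int), m) := by
  induction l with
  | nil => rfl
  | cons s rest ih =>
      have hstep : pvAStep ((m.length : Int), m) s = ((m.length : Int), m) := by
        by_cases hs : s = m
        · subst hs
          simp [pvAStep]
        · have := hlt s (List.mem_cons_self ..) hs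
          simp only [pvAStep]
          rw [if_neg (by simp; omega), if_neg (by simp; omega)]
      rw [List.foldl_cons, hstep]
      exact ih (fun s hs => hlt s (List.mem_cons_of_mem _ hs))

theorem pvFold_find (m : List Char) (l : List (List Char)) (hm : m ∈ l)
    (hlt : ∀ s ∈ l, s ≠ m → s.length < m.length) :
    ∀ acc : Int × List Char, acc.1 < (m.length : Int) →
      l.foldl pvAStep acc = ((m.length : Int), m) := by
  induction l with
  | nil => exact absurd hm (List.not_mem_nil)
  | cons s rest ih =>
      intro acc hacc
      by_cases hs : s = m
      · subst hs
        rw [List.foldl_cons]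
        have hstep : pvAStep acc s = ((s.length : Int), s) := by
          simp [pvAStep, hacc]
        rw [hstep]
        exact pvFold_keep s rest (fun x hx => hlt x (List.mem_cons_of_mem _ hx))
      · have hm' : m ∈ rest := by
          rcases List.mem_cons.mp hm with h | h
          · exact absurd h.symm hs
          · exact h
        have hslt := hlt s (List.mem_cons_self ..) hs
        rw [List.foldl_cons]
        refine ih hm' (fun x hx => hlt x (List.mem_cons_of_mem _ hx)) _ ?_
        simp only [pvAStep]
        split
        · simp; omega
        · split
          · simpa using hacc
          · exact hacc

theorem pvCand_facts (t P S : List Char) (hP : P = [] ∨ P <:+ t) (hS : S = [] ∨ S <+: t)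
    (i' j' : Nat) (hij : i' ≤ j') (hjn : j' < t.length)
    (hst : PySem.Chars.startswith ((t.drop i').take (j' + 1 - i')) P = true)
    (hen : PySem.Chars.endswith ((t.drop i').take (j' + 1 - i')) S = true) :
    (PySem.Chars.find t P).toNat ≤ i' ∧
    j' + 1 ≤ (PySem.Chars.rfind t S).toNat + S.length ∧
    P.length + i' ≤ j' + 1 ∧ S.length + i' ≤ j' + 1 := by
  have hPpre := (PySem.Chars.startswith_iff _ _).mp hst
  have hSsuf := (PySem.Chars.endswith_iff _ _).mp hen
  obtain ⟨hP1, hP2⟩ := List.prefix_take_iff.mp hPpre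
  obtain ⟨hS1, hS2⟩ := pvSuffix_window t S i' (j' + 1 - i') (by omega) hSsuf
  obtain ⟨hf0, hfpre, hfmin⟩ := pvF_facts t P hP
  obtain ⟨hr0, hrlen, hrpre, hrmax⟩ := pvR_facts t S hS
  have hfi : (PySem.Chars.find t P).toNat ≤ i' := by
    by_contra hc
    exact hfmin i' (by omega) hP1
  have hwin : i' + (j' + 1 - i') - S.length = j' + 1 - S.length := by omega
  rw [hwin] at hS2
  have hrj : j' + 1 - S.length ≤ (PySem.Chars.rfind t S).toNat :=
    hrmax _ (by omega) hS2
  exact ⟨hfi, by omega, by omega, by omega⟩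

theorem pvCore (t P S : List Char) (hP : P = [] ∨ P <:+ t) (hS : S = [] ∨ S <+: t) :
    String.ofList ((pvMatching t P S).foldl pvAStep ((0 : Int), [])).2 =
      (if PySem.Chars.rfind t S + (S.length : Int) - PySem.Chars.find t P ≥
          max (max (P.length : Int) (S.length : Int)) 1 then
        String.ofList (PySem.List.slice t (some (PySem.Chars.find t P))
          (some (PySem.Chars.rfind t S + (S.length : Int))))
      else "") := by
  obtain ⟨hf0, hfpre, hfmin⟩ := pvF_facts t P hP
  obtain ⟨hr0, hrlen, hrpre, hrmax⟩ := pvR_facts t S hS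
  set f := PySem.Chars.find t P with hfdef
  set r := PySem.Chars.rfind t S with hrdef
  set i0 := f.toNat with hi0
  set j1 := r.toNat + S.length with hj1
  have hfc : f = (i0 : Int) := (Int.toNat_of_nonneg hf0).symm
  have hrc : r = (r.toNat : Int) := (Int.toNat_of_nonneg hr0).symm
  by_cases hC : r + (S.length : Int) - f ≥ max (max (P.length : Int) (S.length : Int)) 1
  · -- the longest candidate exists and is unique
    rw [if_pos hC]
    rw [ge_iff_le, max_le_iff, max_le_iff] at hC
    obtain ⟨⟨hCP, hCS⟩, hC1⟩ := hC
    have hnP : P.length + i0 ≤ j1 := by omega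
    have hnS : S.length + i0 ≤ j1 := by omega
    have hn1 : i0 + 1 ≤ j1 := by omega
    set m := (t.drop i0).take (j1 - i0) with hm
    have hmlen : m.length = j1 - i0 := by
      rw [hm]; simp [List.length_take, List.length_drop]; omega
    have hslice : PySem.List.slice t (some f) (some (r + (S.length : Int))) = m := by
      rw [PySem.List.slice_toNat t hf0 (by omega)]
      congr 1
      omega
    have hmst : PySem.Chars.startswith m P = true :=
      (PySem.Chars.startswith_iff _ _).mpr
        (List.prefix_take_iff.mpr ⟨hfpre, by omega⟩)
    have hmen : PySem.Chars.endswith m S = true := by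
      refine (PySem.Chars.endswith_iff _ _).mpr
        (pvSuffix_window' t S i0 (j1 - i0) (by omega) (by omega) ?_)
      have : i0 + (j1 - i0) - S.length = r.toNat := by omega
      rw [this]
      exact hrpre
    have hmmem : m ∈ pvMatching t P S := by
      rw [pvMem_matching]
      refine ⟨i0, j1 - 1, by omega, by omega, ?_, ?_, ?_⟩ <;>
        rw [show j1 - 1 + 1 - i0 = j1 - i0 by omega]
      · exact hmst
      · exact hmen
    have hlt : ∀ s ∈ pvMatching t P S, s ≠ m → s.length < m.length := by
      intro s hs hne
      obtain ⟨i', j', hij, hjn, hst, hen, rfl⟩ := (pvMem_matching t P S s).mp hs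
      obtain ⟨h1, h2, h3, h4⟩ := pvCand_facts t P S hP hS i' j' hij hjn hst hen
      have hslen : ((t.drop i').take (j' + 1 - i')).length = j' + 1 - i' := by
        simp [List.length_take, List.length_drop]; omega
      rw [hslen, hmlen]
      rcases Nat.lt_or_ge (j' + 1 - i') (j1 - i0) with h | h
      · exact h
      · exfalso
        apply hne
        have hi : i' = i0 := by omega
        subst hi
        rw [hm]
        congr 1
        omega
    have := pvFold_find m (pvMatching t P S) hmmem hlt ((0 : Int), []) (by simp; omega)
    rw [this, hslice]
  · rw [if_neg hC]
    have hnil : pvMatching t P S = [] := by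
      rw [List.eq_nil_iff_forall_not_mem]
      intro s hs
      obtain ⟨i', j', hij, hjn, hst, hen, rfl⟩ := (pvMem_matching t P S s).mp hs
      obtain ⟨h1, h2, h3, h4⟩ := pvCand_facts t P S hP hS i' j' hij hjn hst hen
      apply hC
      rw [ge_iff_le, max_le_iff, max_le_iff]
      refine ⟨⟨by omega, by omega⟩, by omega⟩
    rw [hnil]
    rfl

-- assemble: both ports reduce to pvCore at the shared prefix/suffix scores
theorem pvMain (text prefixString suffixString : String) :
    find_matching_substring text prefixString suffixString =
      find_matching_substring_alt text prefixString suffixString := by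
  have hP := pvPrefScan_spec text.toList prefixString.toList
    (PySem.List.pyRange (prefixString.toList.length : Int) 0 (-1))
  have hS := pvSufScan_spec text.toList suffixString.toList
    (PySem.List.pyRange 0 (suffixString.toList.length : Int))
  have hcore := pvCore text.toList
    (pvAPrefScan text.toList prefixString.toList (PySem.List.pyRange (prefixString.toList.length : Int) 0 (-1)))
    (pvASufScan text.toList suffixString.toList (PySem.List.pyRange 0 (suffixString.toList.length : Int)))
    hP hS
  unfold pvMatching at hcore
  simp only [find_matching_substring, find_matching_substring_alt,
    ← pvScan_pref_eq, ← pvScan_suf_eq]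
  exact hcore

-- ===== VERDICT (by name: the statement is the Claim_ definition above) =====
theorem find_matching_substring_spec : Claim_equal_find_matching_substring := by
  intro text prefixString suffixString _
  exact pvMain text prefixString suffixString
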